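-- pv_equiv track=rewrite | github.com/Dm-Rb/word_cards_tg_bot | bot/templates/text.py | preparing_translation_ru_word
-- ===== SOURCE A (Python) =====
-- def preparing_translation_ru_word(translation_ru):
--     result = ''
--     slices = len(translation_ru) // 2
--     for i in range(len(translation_ru)):
--         if i <= slices:
--             result += f'<tg-spoiler>{translation_ru[i]}</tg-spoiler>'
--         else:
--             if translation_ru[i] != ' ':
--                 result += '*'
--             else:
--                 result += ' '
--     return result
-- ===== SOURCE B (Python) =====
-- def preparing_translation_ru_word(translation_ru):
--     k = len(translation_ru) // 2 + 1
--     head = translation_ru[:k]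
--     tail = translation_ru[k:]
--     head_str = ('<tg-spoiler>' + '</tg-spoiler><tg-spoiler>'.join(head) + '</tg-spoiler>') if head else ''
--     tail_str = ' '.join('*' * len(w) for w in tail.split(' '))
--     return head_str + tail_str
-- ===== Notes on version B (the rewrite author's own statement) =====
-- stated objective: alternative
-- what changed: Removes A's per-character branching loop entirely: B builds the spoiler head with the separator-join trick ('</tg-spoiler><tg-spoiler>'.join) and the masked tail by splitting on spaces and emitting a star-run per word, joined back with spaces.
import Mathlib
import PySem

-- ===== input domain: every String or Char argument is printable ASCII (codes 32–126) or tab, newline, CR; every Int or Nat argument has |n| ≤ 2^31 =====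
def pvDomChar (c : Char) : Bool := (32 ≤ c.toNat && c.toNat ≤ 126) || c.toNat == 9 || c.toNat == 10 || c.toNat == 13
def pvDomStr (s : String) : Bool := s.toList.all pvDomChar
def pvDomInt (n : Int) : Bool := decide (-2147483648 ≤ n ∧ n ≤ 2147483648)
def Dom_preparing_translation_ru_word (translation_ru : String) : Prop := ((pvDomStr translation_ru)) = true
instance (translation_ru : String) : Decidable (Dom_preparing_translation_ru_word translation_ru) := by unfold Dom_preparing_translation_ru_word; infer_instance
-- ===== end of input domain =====

-- B drops A's per-character branching loop entirely: the spoiler head is built by the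
-- separator-join trick and the tail by splitting on spaces and emitting '*'-runs per word
-- (objective: alternative string-operation algorithm, no per-character iteration).

-- ===== PORT A =====
-- literal transliteration of A: accumulate over i in range(len), branching on i <= slices
def preparing_translation_ru_word (translation_ru : String) : String :=
  let l := translation_ru.toList
  let slices := l.length / 2
  (List.range l.length).foldl (fun result i =>
    if i ≤ slices then
      result ++ ("<tg-spoiler>" ++ String.singleton (l.getD i ' ') ++ "</tg-spoiler>")
    else if l.getD i ' ' ≠ ' ' then
      result ++ "*"
    else
      result ++ " ") ""

-- ===== PORT B =====
-- literal transliteration of Source B at the Chars level (PySem.Str ops are thin wrappers over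
-- PySem.Chars on toList): slices via PySem.List.slice, str.join via PySem.Chars.join,
-- tail.split(' ') via PySem.Chars.splitOn, '*' * len(w) via List.replicate (exact for n ≥ 0)
def preparing_translation_ru_word_alt (translation_ru : String) : String :=
  let l := translation_ru.toList
  let k : Int := (l.length / 2 + 1 : Nat)
  let head := PySem.List.slice l none (some k)
  let tail := PySem.List.slice l (some k) none
  let head_str :=
    if head ≠ [] then
      "<tg-spoiler>".toList
        ++ PySem.Chars.join "</tg-spoiler><tg-spoiler>".toList (head.map (fun c => [c]))
        ++ "</tg-spoiler>".toList
    else []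
  let tail_str :=
    PySem.Chars.join [' ']
      ((PySem.Chars.splitOn tail [' ']).map (fun w => List.replicate w.length '*'))
  String.ofList (head_str ++ tail_str)

-- ===== PRECONDITION & SPEC =====
def Spec_preparing_translation_ru_word (translation_ru : String) (out : String) : Prop := out = preparing_translation_ru_word_alt translation_ru
instance (translation_ru : String) (out : String) : Decidable (Spec_preparing_translation_ru_word translation_ru out) := by unfold Spec_preparing_translation_ru_word; infer_instance

-- ===== CLAIM (what is proved, stated in full; the proofs are below) =====
def Claim_equal_preparing_translation_ru_word : Prop := ∀ (translation_ru : String), Dom_preparing_translation_ru_word translation_ru → Spec_preparing_translation_ru_word translation_ru (preparing_translation_ru_word translation_ru)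

-- ===== LEMMAS AND PROOFS =====

-- the char-level piece A appends at index i, for threshold k
def pvPiece (l : List Char) (k : Nat) (i : Nat) : List Char :=
  if i < k then "<tg-spoiler>".toList ++ [l.getD i ' '] ++ "</tg-spoiler>".toList
  else [if l.getD i ' ' ≠ ' ' then '*' else ' ']

lemma pv_foldl_toList (p : Nat → String) :
    ∀ (li : List Nat) (acc : String),
      (li.foldl (fun r i => r ++ p i) acc).toList
        = acc.toList ++ li.flatMap (fun i => (p i).toList) := by
  intro li
  induction li with
  | nil => intro acc; simp
  | cons a t ih => intro acc; simp [ih, List.append_assoc]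

-- splitting an index-driven flatMap over range at threshold k
lemma pv_flat_split (F G : Char → List Char) :
    ∀ (l : List Char) (k : Nat),
      (List.range l.length).flatMap
          (fun i => if i < k then F (l.getD i ' ') else G (l.getD i ' '))
        = (l.take k).flatMap F ++ (l.drop k).flatMap G := by
  intro l
  induction l with
  | nil => intro k; simp
  | cons a t ih =>
    intro k
    cases k with
    | zero =>
      simp only [List.length_cons, List.range_succ_eq_map, List.flatMap_cons,
        List.flatMap_map, List.take_zero, List.drop_zero, List.flatMap_nil,
        List.nil_append, List.flatMap_cons]
      have h := ih 0
      simp only [Nat.not_lt_zero, if_false, List.take_zero, List.drop_zero,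
        List.flatMap_nil, List.nil_append] at h ⊢
      rw [show (fun i => G ((a :: t).getD (i + 1) ' ')) = (fun i => G (t.getD i ' ')) from rfl]
      rw [← h]
      simp [List.getD]
    | succ k' =>
      simp only [List.length_cons, List.range_succ_eq_map, List.flatMap_cons,
        List.flatMap_map, List.take_succ_cons, List.drop_succ_cons,
        List.flatMap_cons, List.append_assoc]
      congr 1
      rw [← ih k']
      exact List.flatMap_congr (by intro i _; simp [List.getD])

lemma pv_step_eq (l : List Char) (slices : Nat) :
    (fun (result : String) (i : Nat) =>
      if i ≤ slices then
        result ++ ("<tg-spoiler>" ++ String.singleton (l.getD i ' ') ++ "</tg-spoiler>")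
      else if l.getD i ' ' ≠ ' ' then
        result ++ "*"
      else
        result ++ " ")
    = (fun (result : String) (i : Nat) => result ++ String.ofList (pvPiece l (slices + 1) i)) := by
  funext r i
  apply String.ext
  unfold pvPiece
  have h : i < slices + 1 ↔ i ≤ slices := Nat.lt_succ_iff
  split_ifs <;> simp_all

lemma pv_flatMap_single (g : Char → Char) :
    ∀ (l : List Char), List.flatMap (fun c => [g c]) l = List.map g l := by
  intro l
  induction l with
  | nil => simp
  | cons a t ih => simp [ih]

-- simple recursive characterization of split on a single space
def pvSp : List Char → List (List Char)
  | [] => [[]]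
  | c :: r =>
    if c = ' ' then [] :: pvSp r
    else
      match pvSp r with
      | p :: ps => (c :: p) :: ps
      | [] => [[c]]

lemma pvSp_ne_nil : ∀ t : List Char, pvSp t ≠ [] := by
  intro t
  cases t with
  | nil => simp [pvSp]
  | cons c r =>
    simp only [pvSp]
    split_ifs
    · simp
    · cases h : pvSp r <;> simp

-- invariant of PySem's fueled split loop, specialized to the single-char separator ' '
lemma pv_go_inv : ∀ (t : List Char) (fuel : Nat) (cs : List Char) (ac : List (List Char)),
    t.length < fuel →
    PySem.Chars.splitOn.go [' '] fuel t cs ac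
      = ac.reverse ++ (pvSp t).modifyHead (cs.reverse ++ ·) := by
  intro t
  induction t with
  | nil =>
    intro fuel cs ac h
    cases fuel with
    | zero => omega
    | succ f => simp [PySem.Chars.splitOn.go, pvSp]
  | cons c r ih =>
    intro fuel cs ac h
    cases fuel with
    | zero => simp at h
    | succ f =>
      rw [PySem.Chars.splitOn.go]
      by_cases hc : c = ' '
      · subst hc
        have hp : [' '].isPrefixOf (' ' :: r) = true := by simp [List.isPrefixOf]
        simp only [hp, if_true, List.length_cons, List.length_nil, List.drop_succ_cons,
          List.drop_zero]
        rw [ih f [] ((cs.reverse) :: ac) (by simp at h; omega)]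
        simp only [pvSp, List.modifyHead, List.reverse_nil, List.nil_append, List.reverse_cons,
          List.append_assoc, List.singleton_append]
        cases pvSp r <;> simp
      · have hp : [' '].isPrefixOf (c :: r) = false := by
          simp [List.isPrefixOf]; exact fun hcc => hc hcc.symm
        simp only [hp, Bool.false_eq_true, if_false]
        rw [ih f (c :: cs) ac (by simp at h; omega)]
        simp only [pvSp, hc, if_false]
        obtain ⟨p, ps, hps⟩ : ∃ p ps, pvSp r = p :: ps := by
          cases hx : pvSp r with
          | nil => exact absurd hx (pvSp_ne_nil r)
          | cons p ps => exact ⟨p, ps, rfl⟩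
        rw [hps]
        simp [List.append_assoc]

lemma pv_splitOn_eq (t : List Char) : PySem.Chars.splitOn t [' '] = pvSp t := by
  unfold PySem.Chars.splitOn
  rw [pv_go_inv t (t.length + 1) [] [] (Nat.lt_succ_self _)]
  obtain ⟨p, ps, hps⟩ : ∃ p ps, pvSp t = p :: ps := by
    cases hx : pvSp t with
    | nil => exact absurd hx (pvSp_ne_nil t)
    | cons p ps => exact ⟨p, ps, rfl⟩
  simp [hps]

-- prepending a char to the first piece prepends it to the join
lemma pv_join_cons_char (sep w : List Char) (c : Char) (ws : List (List Char)) :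
    PySem.Chars.join sep ((c :: w) :: ws) = c :: PySem.Chars.join sep (w :: ws) := by
  cases ws with
  | nil => simp [PySem.Chars.join_singleton]
  | cons q qs => simp [PySem.Chars.join_cons_cons]

-- the tail: ' '.join('*' * len(w) for w in tail.split(' ')) masks each non-space char
lemma pv_tail : ∀ t : List Char,
    PySem.Chars.join [' '] ((pvSp t).map (fun w => List.replicate w.length '*'))
      = t.map (fun c => if c ≠ ' ' then '*' else ' ') := by
  intro t
  induction t with
  | nil => simp [pvSp, PySem.Chars.join_singleton]
  | cons c r ih =>
    obtain ⟨p, ps, hps⟩ : ∃ p ps, pvSp r = p :: ps := by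
      cases hx : pvSp r with
      | nil => exact absurd hx (pvSp_ne_nil r)
      | cons p ps => exact ⟨p, ps, rfl⟩
    rw [hps] at ih
    by_cases hc : c = ' '
    · subst hc
      simp only [pvSp, if_true, hps, List.map_cons, List.length_nil, List.replicate_zero,
        PySem.Chars.join_cons_cons, List.nil_append, List.singleton_append]
      rw [if_neg (fun h => h rfl),
        show List.replicate p.length '*' :: List.map (fun w => List.replicate w.length '*') ps
          = List.map (fun w => List.replicate w.length '*') (p :: ps) from rfl, ih]
    · simp only [pvSp, hc, if_false, hps, List.map_cons, List.length_cons,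
        List.replicate_succ]
      rw [pv_join_cons_char, if_pos hc,
        show List.replicate p.length '*' :: List.map (fun w => List.replicate w.length '*') ps
          = List.map (fun w => List.replicate w.length '*') (p :: ps) from rfl, ih]

-- the head: the separator-join trick wraps every char (head nonempty)
lemma pv_head : ∀ (h : List Char), h ≠ [] →
    "<tg-spoiler>".toList
      ++ PySem.Chars.join "</tg-spoiler><tg-spoiler>".toList (h.map (fun c => [c]))
      ++ "</tg-spoiler>".toList
    = h.flatMap (fun c => "<tg-spoiler>".toList ++ [c] ++ "</tg-spoiler>".toList) := by
  intro h
  induction h with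
  | nil => intro hne; exact absurd rfl hne
  | cons c r ih =>
    intro _
    cases r with
    | nil => simp [PySem.Chars.join_singleton]
    | cons d rs =>
      simp only [List.map_cons, PySem.Chars.join_cons_cons]
      rw [show ([d] : List Char) :: List.map (fun c => [c]) rs
            = List.map (fun c => ([c] : List Char)) (d :: rs) from rfl]
      have hmid : "</tg-spoiler><tg-spoiler>".toList
          = "</tg-spoiler>".toList ++ "<tg-spoiler>".toList := by decide
      rw [List.flatMap_cons, ← ih (by simp), hmid]
      simp only [List.append_assoc]

-- ===== VERDICT (by name: the statement is the Claim_ definition above) =====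
theorem preparing_translation_ru_word_spec : Claim_equal_preparing_translation_ru_word := by
  unfold Claim_equal_preparing_translation_ru_word Spec_preparing_translation_ru_word
  intro s _
  unfold preparing_translation_ru_word preparing_translation_ru_word_alt
  dsimp only
  set l := s.toList with hl
  apply String.ext
  rw [pv_step_eq l (l.length / 2)]
  rw [pv_foldl_toList (fun i => String.ofList (pvPiece l (l.length / 2 + 1) i))]
  simp only [String.toList_empty, List.nil_append]
  have hsplit := pv_flat_split
    (fun c => "<tg-spoiler>".toList ++ [c] ++ "</tg-spoiler>".toList)
    (fun c => [if c ≠ ' ' then '*' else ' ']) l (l.length / 2 + 1)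
  unfold pvPiece
  simp only [String.toList_ofList]
  rw [hsplit]
  have hslt : PySem.List.slice l none (some ((l.length / 2 + 1 : Nat) : Int))
      = l.take (l.length / 2 + 1) := by
    rw [PySem.List.slice_to l (by positivity), Int.toNat_natCast]
  have hslf : PySem.List.slice l (some ((l.length / 2 + 1 : Nat) : Int)) none
      = l.drop (l.length / 2 + 1) := by
    rw [PySem.List.slice_from l (by positivity), Int.toNat_natCast]
  rw [hslt, hslf, pv_splitOn_eq, pv_tail, ← pv_flatMap_single]
  by_cases hL : l = []
  · rw [hL]; simp
  · have hne : l.take (l.length / 2 + 1) ≠ [] := by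
      simp [List.take_eq_nil_iff, hL]
    rw [if_pos hne, pv_head _ hne]
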